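-- pv_equiv track=rewrite | github.com/Yo0oN/CodingTestStudy | JE/5주차/GetLottoMaxMin.py | solution
-- ===== SOURCE A (Python) =====
-- def solution(lottos, win_nums):
--     answer = []
--     count = [0, 0]
--
--     for lotto in lottos:
--         if lotto in win_nums:
--             count[0] += 1
--             count[1] += 1
--
--         elif lotto == 0:
--             count[0] += 1
--
--     max = count[0]
--     min = count[1]
--
--     if max == 6:
--         answer.append(1)
--
--     elif max == 5:
--         answer.append(2)
--
--     elif max == 4:
--         answer.append(3)
--
--     elif max == 3:
--         answer.append(4)
--
--     elif max == 2:
--         answer.append(5)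
--
--     else:
--         answer.append(6)
--
--     if min == 6:
--         answer.append(1)
--
--     elif min == 5:
--         answer.append(2)
--
--     elif min == 4:
--         answer.append(3)
--
--     elif min == 3:
--         answer.append(4)
--
--     elif min == 2:
--         answer.append(5)
--
--     else:
--         answer.append(6)
--
--     return answer
-- ===== SOURCE B (Python) =====
-- _RANK_TABLE = [6, 6, 5, 4, 3, 2, 1]
--
--
-- def _rank(c):
--     return _RANK_TABLE[c] if c < 7 else 6
--
--
-- def solution(lottos, win_nums):
--     wins = set(win_nums)
--     matched = sum(lottos.count(v) for v in wins)
--     wild = 0 if 0 in wins else lottos.count(0)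
--     return [_rank(matched + wild), _rank(matched)]
-- ===== Notes on version B (the rewrite author's own statement) =====
-- stated objective: alternative
-- what changed: Instead of A's single loop over lottos mutating a two-cell counter and a 12-branch if-elif rank table, B iterates over the deduplicated set of win_nums summing lottos.count(v) for matches, takes wild = lottos.count(0) unless 0 is a winning number, and reads each rank from a precomputed lookup table.
import Mathlib
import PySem

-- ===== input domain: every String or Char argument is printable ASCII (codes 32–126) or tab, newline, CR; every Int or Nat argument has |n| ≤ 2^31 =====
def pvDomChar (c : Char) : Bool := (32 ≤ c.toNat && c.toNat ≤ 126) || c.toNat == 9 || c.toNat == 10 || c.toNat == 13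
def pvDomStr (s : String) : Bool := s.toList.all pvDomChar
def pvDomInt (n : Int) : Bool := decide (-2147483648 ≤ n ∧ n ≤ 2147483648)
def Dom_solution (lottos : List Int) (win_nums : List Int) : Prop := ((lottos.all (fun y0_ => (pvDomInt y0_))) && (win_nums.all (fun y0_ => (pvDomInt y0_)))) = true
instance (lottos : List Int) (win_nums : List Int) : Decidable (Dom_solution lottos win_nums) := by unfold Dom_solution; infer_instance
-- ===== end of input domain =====

-- B replaces A's per-lotto mutating loop and 12-branch rank table with a sum of lottos.count(v) over the set of win_nums, a count of zeros, and a rank lookup table; objective: alternative.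


-- ===== PORT A =====
def solution (lottos : List Int) (win_nums : List Int) : List Int :=
  let count : Int × Int := lottos.foldl (fun c lotto =>
    if win_nums.contains lotto then (c.1 + 1, c.2 + 1)
    else if lotto = 0 then (c.1 + 1, c.2)
    else c) (0, 0)
  let max := count.1
  let min := count.2
  let a1 : Int := if max = 6 then 1 else if max = 5 then 2 else if max = 4 then 3
    else if max = 3 then 4 else if max = 2 then 5 else 6
  let a2 : Int := if min = 6 then 1 else if min = 5 then 2 else if min = 4 then 3
    else if min = 3 then 4 else if min = 2 then 5 else 6
  [a1, a2]

-- ===== PORT B =====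
def rankTableB : List Int := [6, 6, 5, 4, 3, 2, 1]

-- table lookup _RANK_TABLE[c]; the .getD 0 default is unreachable at B's call sites (0 <= c < 7)
def rankB (c : Int) : Int := if c < 7 then (PySem.List.pyGet? rankTableB c).getD 0 else 6

def solution_alt (lottos : List Int) (win_nums : List Int) : List Int :=
  let wins := PySem.Set.ofList win_nums
  -- sum(lottos.count(v) for v in wins); summed over the set, so the result is order-independent
  let matched : Int := ((wins.foldl (fun s v => s + lottos.count v) 0 : Nat) : Int)
  let wild : Int := if PySem.Set.contains wins 0 then 0 else ((lottos.count 0 : Nat) : Int)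
  [rankB (matched + wild), rankB matched]

-- ===== PRECONDITION & SPEC =====
def Spec_solution (lottos : List Int) (win_nums : List Int) (out : List Int) : Prop := out = solution_alt lottos win_nums
instance (lottos : List Int) (win_nums : List Int) (out : List Int) : Decidable (Spec_solution lottos win_nums out) := by unfold Spec_solution; infer_instance

-- ===== CLAIM (what is proved, stated in full; the proofs are below) =====
def Claim_equal_solution : Prop := ∀ (lottos : List Int) (win_nums : List Int), Dom_solution lottos win_nums → Spec_solution lottos win_nums (solution lottos win_nums)

-- ===== LEMMAS AND PROOFS =====

-- A's loop state in terms of the two counts, shifted by the initial state.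
theorem solution_fold_inv (win_nums : List Int) (lottos : List Int) (a b : Int) :
    lottos.foldl (fun c lotto =>
      if win_nums.contains lotto then (c.1 + 1, c.2 + 1)
      else if lotto = 0 then (c.1 + 1, c.2)
      else c) (a, b)
    = (a + (lottos.countP (fun x => win_nums.contains x) : Int)
         + (lottos.countP (fun x => x == 0 && !win_nums.contains x) : Int),
       b + (lottos.countP (fun x => win_nums.contains x) : Int)) := by
  induction lottos generalizing a b with
  | nil => simp
  | cons x xs ih =>
    rw [List.foldl_cons]
    simp only [List.countP_cons]
    by_cases h : win_nums.contains x = true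
    · have hm : x ∈ win_nums := by simpa using h
      rw [if_pos h, ih]
      simp [hm]
      constructor <;> ring
    · have hm : x ∉ win_nums := by simpa using h
      by_cases hx : x = 0
      · subst hx
        rw [if_neg h, if_pos rfl, ih]
        simp [hm]
        ring
      · rw [if_neg h, if_neg hx, ih]
        simp [hm, hx]

-- countP splits over a disjunction of disjoint predicates
theorem countP_or_disjoint (l : List Int) (p q : Int → Bool) (h : ∀ x, ¬(p x = true ∧ q x = true)) :
    l.countP (fun x => p x || q x) = l.countP p + l.countP q := by
  induction l with
  | nil => simp
  | cons x xs ih =>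
    simp only [List.countP_cons, ih]
    by_cases hp : p x = true
    · have hq : ¬ q x = true := fun hq => h x ⟨hp, hq⟩
      simp [hp, hq]; omega
    · by_cases hq : q x = true
      · simp [hp, hq]; omega
      · simp [hp, hq]

-- summing lottos.count v over a duplicate-free list ws counts the members of ws with multiplicity
theorem sum_count_eq (lottos : List Int) (ws : List Int) (hnd : ws.Nodup) :
    (ws.map (fun v => lottos.count v)).sum = lottos.countP (fun x => ws.contains x) := by
  induction ws with
  | nil => simp
  | cons v vs ih =>
    rcases List.nodup_cons.mp hnd with ⟨hv, hnd'⟩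
    have hsplit : lottos.countP (fun x => (v :: vs).contains x)
        = lottos.countP (fun x => x == v) + lottos.countP (fun x => vs.contains x) := by
      have := countP_or_disjoint lottos (fun x => x == v) (fun x => vs.contains x)
        (by
          intro x hx
          obtain ⟨h1, h2⟩ := hx
          have hx0 : x = v := by simpa using h1
          have hx1 : x ∈ vs := by simpa using h2
          exact hv (hx0 ▸ hx1))
      rw [← this]
      apply List.countP_congr
      intro a _
      simp
    rw [List.map_cons, List.sum_cons, hsplit, ih hnd', List.count_eq_countP]

-- A's if-elif chain equals B's table lookup on nonnegative counts.
theorem chain_eq_rankB (c : Int) (h : 0 ≤ c) :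
    (if c = 6 then (1:Int) else if c = 5 then 2 else if c = 4 then 3
      else if c = 3 then 4 else if c = 2 then 5 else 6) = rankB c := by
  rcases (by omega : c = 0 ∨ c = 1 ∨ c = 2 ∨ c = 3 ∨ c = 4 ∨ c = 5 ∨ c = 6 ∨ 7 ≤ c) with
    h | h | h | h | h | h | h | h
  · subst h; decide
  · subst h; decide
  · subst h; decide
  · subst h; decide
  · subst h; decide
  · subst h; decide
  · subst h; decide
  · unfold rankB
    split_ifs <;> omega

-- ===== VERDICT (by name: the statement is the Claim_ definition above) =====
theorem solution_spec : Claim_equal_solution := by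
  intro lottos win_nums _
  show solution lottos win_nums = solution_alt lottos win_nums
  unfold solution solution_alt
  have hnd : (PySem.Set.ofList win_nums).Nodup := PySem.Set.nodup_ofList win_nums
  have hmem : ∀ x, PySem.Set.contains (PySem.Set.ofList win_nums) x = win_nums.contains x := by
    intro x; simp [PySem.Set.contains]
  have hmatch : ((PySem.Set.ofList win_nums).foldl (fun s v => s + lottos.count v) 0 : Nat)
      = lottos.countP (fun x => win_nums.contains x) := by
    rw [PySem.List.foldl_add_nat, sum_count_eq lottos _ hnd]
    simp only [Nat.zero_add]
    apply List.countP_congr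
    intro a _
    simp [List.contains_eq_mem, PySem.Set.mem_ofList]
  have hwild : (if PySem.Set.contains (PySem.Set.ofList win_nums) 0 then (0:Int)
        else ((lottos.count 0 : Nat) : Int))
      = (lottos.countP (fun x => x == 0 && !win_nums.contains x) : Int) := by
    rw [hmem 0]
    by_cases h0 : (0:Int) ∈ win_nums
    · have hz : lottos.countP (fun x => x == 0 && !win_nums.contains x) = 0 := by
        apply List.countP_eq_zero.mpr
        intro a _
        by_cases ha : a = 0 <;> simp [ha, h0]
      have hc0 : win_nums.contains 0 = true := by simpa using h0
      rw [if_pos hc0, hz]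
      simp
    · have hz : lottos.countP (fun x => x == 0 && !win_nums.contains x)
          = lottos.countP (fun x => x == 0) := by
        apply List.countP_congr
        intro a _
        by_cases ha : a = 0 <;> simp [ha, h0]
      rw [if_neg (by simp [h0]), hz, List.count_eq_countP]
  simp only [solution_fold_inv, hmatch, hwild]
  rw [chain_eq_rankB _ (by positivity), chain_eq_rankB _ (by positivity)]
  norm_num
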